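-- pv_equiv track=rewrite | github.com/sign-language-translator/sign-language-translator | sign_language_translator/text/utils.py | extract_supported_subsequences
-- ===== SOURCE A (Python) =====
-- from typing import Any, Iterable, List, Optional, Set, Tuple, Union
--
-- def extract_supported_subsequences_indexes(
--     sequence: Iterable[Any],
--     tags: Iterable[Any],
--     supported_tags: Set[Any],
--     skipped_items: Set[Any],
-- ) -> List[List[int]]:
--     """Extract indexes of supported subsequences from a sequence based on tags and skipped items.
--
--     Args:
--         sequence (Iterable[Any]): The input sequence.
--         tags (Iterable[Any]): Tags corresponding to each item in the sequence.
--         supported_tags (Set[Any]): Set of tags indicating support for a subsequence.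
--         skipped_items (Set[Any]): Set of items to be skipped.
--
--     Returns:
--         List[List[int]]: A list indices of supported subsequences, where each inner list represents a subsequence.
--
--     Examples:
--
--     .. code-block:: python
--
--         sequence = [1, 2, 3, 4, 5, 6]
--         tags = ['A', 'A', 'B', 'A', 'A', 'C']
--         supported_tags = {'A'}
--         skipped_items = {2}
--         extract_supported_subsequences(sequence, tags, supported_tags, skipped_items)
--         # [[0], [3, 4]]
--     """
--
--     all_subsequences = []
--     subsequence = []
--     for i, (token, tag) in enumerate(zip(sequence, tags)):
--         if (tag in supported_tags) and (token not in skipped_items):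
--             subsequence.append(i)
--         else:
--             if subsequence:
--                 all_subsequences.append(subsequence)
--                 subsequence = []
--
--     if subsequence:
--         all_subsequences.append(subsequence)
--
--     return all_subsequences
--
-- def extract_supported_subsequences(
--     sequence: Iterable[Any],
--     tags: Iterable[Any],
--     supported_tags: Set[Any],
--     skipped_items: Set[Any],
-- ) -> List[List[Any]]:
--     """Extract supported subsequences from a sequence based on tags and skipped items.
--
--     Args:
--         sequence (Iterable[Any]): The input sequence.
--         tags (Iterable[Any]): Tags corresponding to each item in the sequence.
--         supported_tags (Set[Any]): Set of tags indicating support for a subsequence.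
--         skipped_items (Set[Any]): Set of items to be skipped.
--
--     Returns:
--         List[List[Any]]: A list of supported subsequences, where each inner list represents a subsequence.
--
--     Examples:
--
--     .. code-block:: python
--
--         sequence = [1, 2, 3, 4, 5, 6]
--         tags = ['A', 'A', 'B', 'A', 'A', 'C']
--         supported_tags = {'A'}
--         skipped_items = {2}
--         extract_supported_subsequences(sequence, tags, supported_tags, skipped_items)
--         # [[1], [4, 5]]
--     """
--
--     indexes = extract_supported_subsequences_indexes(
--         sequence=sequence,
--         tags=tags,
--         supported_tags=supported_tags,
--         skipped_items=skipped_items,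
--     )
--
--     subsequences = [[sequence[i] for i in index] for index in indexes]  # type: ignore
--
--     return subsequences
-- ===== SOURCE B (Python) =====
-- def extract_supported_subsequences(sequence, tags, supported_tags, skipped_items):
--     pairs = list(zip(sequence, tags))
--     n = len(pairs)
--     result = []
--     i = 0
--     while i < n:
--         token, tag = pairs[i]
--         if tag in supported_tags and token not in skipped_items:
--             j = i + 1
--             while j < n and pairs[j][1] in supported_tags and pairs[j][0] not in skipped_items:
--                 j += 1
--             result.append([t for t, _ in pairs[i:j]])
--             i = j
--         else:
--             i += 1
--     return result
-- ===== Notes on version B (the rewrite author's own statement) =====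
-- stated objective: alternative
-- what changed: Replaced A's two-phase index-collection-then-gather (helper building index runs element by element, then a nested comprehension re-indexing sequence[i]) with a run-at-a-time two-pointer scan: an outer loop finds the start of each supported run, an inner loop scans to its end, and the whole slice is emitted at once.
import Mathlib
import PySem

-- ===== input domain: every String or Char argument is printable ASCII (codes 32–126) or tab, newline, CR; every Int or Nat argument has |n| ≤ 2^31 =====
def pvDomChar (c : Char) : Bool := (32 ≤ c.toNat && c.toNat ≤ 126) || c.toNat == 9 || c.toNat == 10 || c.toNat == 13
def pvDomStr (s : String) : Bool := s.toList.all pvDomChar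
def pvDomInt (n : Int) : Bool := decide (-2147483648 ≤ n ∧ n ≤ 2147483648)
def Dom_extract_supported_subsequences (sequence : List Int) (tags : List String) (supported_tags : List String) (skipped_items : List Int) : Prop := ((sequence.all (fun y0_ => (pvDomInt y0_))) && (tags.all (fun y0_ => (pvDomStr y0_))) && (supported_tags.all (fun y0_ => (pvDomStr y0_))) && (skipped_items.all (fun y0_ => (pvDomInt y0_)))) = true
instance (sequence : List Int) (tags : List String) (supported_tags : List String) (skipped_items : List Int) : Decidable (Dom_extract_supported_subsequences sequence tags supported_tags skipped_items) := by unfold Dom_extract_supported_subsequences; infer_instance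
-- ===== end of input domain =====

-- B replaces A's two-phase index-collection-then-gather with a run-at-a-time two-pointer scan: same O(n) cost, different decomposition.

-- ===== PORT A =====
-- A's helper extract_supported_subsequences_indexes: enumerate(zip(sequence, tags)) with a run of indexes.
-- The enumerate counter is carried explicitly as i.
def pvIdxLoop (supported_tags : List String) (skipped_items : List Int) :
    Nat → List (Int × String) → List (List Nat) → List Nat → List (List Nat)
  | _, [], all_subsequences, subsequence =>
      -- trailing 'if subsequence: all_subsequences.append(subsequence)'
      if subsequence ≠ [] then all_subsequences ++ [subsequence] else all_subsequences
  | i, (token, tag) :: rest, all_subsequences, subsequence =>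
      if supported_tags.contains tag ∧ ¬ skipped_items.contains token then
        pvIdxLoop supported_tags skipped_items (i + 1) rest all_subsequences (subsequence ++ [i])
      else if subsequence ≠ [] then
        pvIdxLoop supported_tags skipped_items (i + 1) rest (all_subsequences ++ [subsequence]) []
      else
        pvIdxLoop supported_tags skipped_items (i + 1) rest all_subsequences subsequence

def extract_supported_subsequences (sequence : List Int) (tags : List String) (supported_tags : List String) (skipped_items : List Int) : List (List Int) :=
  let indexes := pvIdxLoop supported_tags skipped_items 0 (sequence.zip tags) [] []
  -- [[sequence[i] for i in index] for index in indexes]; every i is in range, so pyGetD is exact here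
  indexes.map (fun index => index.map (fun i => PySem.List.pyGetD sequence (Int.ofNat i) 0))

-- ===== PORT B =====
-- inner while of Source B: 'while j < n and pairs[j][1] in supported_tags and pairs[j][0] not in skipped_items: j += 1'
def pvInner (supported_tags : List String) (skipped_items : List Int)
    (pairs : List (Int × String)) (n : Nat) (j : Nat) : Nat :=
  if j < n ∧ (supported_tags.contains (pairs.getD j (0, "")).2
      && !(skipped_items.contains (pairs.getD j (0, "")).1)) = true then
    pvInner supported_tags skipped_items pairs n (j + 1)
  else j
termination_by n - j
decreasing_by omega

lemma pvInner_ge (supported_tags : List String) (skipped_items : List Int)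
    (pairs : List (Int × String)) (n : Nat) (j : Nat) :
    j ≤ pvInner supported_tags skipped_items pairs n j := by
  unfold pvInner
  split
  · have := pvInner_ge supported_tags skipped_items pairs n (j + 1)
    omega
  · exact le_rfl
termination_by n - j
decreasing_by omega

-- outer while of Source B, carrying the index i and the result accumulator
def pvOuterLoop (supported_tags : List String) (skipped_items : List Int)
    (pairs : List (Int × String)) (n : Nat) (i : Nat) (result : List (List Int)) : List (List Int) :=
  if hi : i < n then
    let p := pairs.getD i (0, "")
    if (supported_tags.contains p.2 && !(skipped_items.contains p.1)) = true then
      let j := pvInner supported_tags skipped_items pairs n (i + 1)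
      pvOuterLoop supported_tags skipped_items pairs n j
        (result ++ [((pairs.drop i).take (j - i)).map Prod.fst])
    else
      pvOuterLoop supported_tags skipped_items pairs n (i + 1) result
  else result
termination_by n - i
decreasing_by
  · have := pvInner_ge supported_tags skipped_items pairs n (i + 1); omega
  · omega

def extract_supported_subsequences_alt (sequence : List Int) (tags : List String) (supported_tags : List String) (skipped_items : List Int) : List (List Int) :=
  let pairs := sequence.zip tags
  pvOuterLoop supported_tags skipped_items pairs pairs.length 0 []

-- ===== PRECONDITION & SPEC =====
def Spec_extract_supported_subsequences (sequence : List Int) (tags : List String) (supported_tags : List String) (skipped_items : List Int) (out : List (List Int)) : Prop := out = extract_supported_subsequences_alt sequence tags supported_tags skipped_items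
instance (sequence : List Int) (tags : List String) (supported_tags : List String) (skipped_items : List Int) (out : List (List Int)) : Decidable (Spec_extract_supported_subsequences sequence tags supported_tags skipped_items out) := by unfold Spec_extract_supported_subsequences; infer_instance

-- ===== CLAIM (what is proved, stated in full; the proofs are below) =====
def Claim_equal_extract_supported_subsequences : Prop := ∀ (sequence : List Int) (tags : List String) (supported_tags : List String) (skipped_items : List Int), Dom_extract_supported_subsequences sequence tags supported_tags skipped_items → Spec_extract_supported_subsequences sequence tags supported_tags skipped_items (extract_supported_subsequences sequence tags supported_tags skipped_items)

-- ===== LEMMAS AND PROOFS =====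

-- the filter both programs apply to a (token, tag) pair
def pvKeep (supported_tags : List String) (skipped_items : List Int) (p : Int × String) : Bool :=
  supported_tags.contains p.2 && !(skipped_items.contains p.1)

-- proof-only intermediate: A's loop fused to carry tokens instead of indexes
def pvRunLoop (supported_tags : List String) (skipped_items : List Int) :
    List (Int × String) → List (List Int) → List Int → List (List Int)
  | [], all_subsequences, run =>
      if run ≠ [] then all_subsequences ++ [run] else all_subsequences
  | (token, tag) :: rest, all_subsequences, run =>
      if supported_tags.contains tag ∧ ¬ skipped_items.contains token then
        pvRunLoop supported_tags skipped_items rest all_subsequences (run ++ [token])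
      else if run ≠ [] then
        pvRunLoop supported_tags skipped_items rest (all_subsequences ++ [run]) []
      else
        pvRunLoop supported_tags skipped_items rest all_subsequences run

-- proof-only intermediate: run-at-a-time characterization via takeWhile/dropWhile
def pvChunks (supported_tags : List String) (skipped_items : List Int) : List (Int × String) → List (List Int)
  | [] => []
  | p :: rest =>
      if pvKeep supported_tags skipped_items p = true then
        ((p :: rest).takeWhile (pvKeep supported_tags skipped_items)).map Prod.fst ::
          pvChunks supported_tags skipped_items (rest.dropWhile (pvKeep supported_tags skipped_items))
      else pvChunks supported_tags skipped_items rest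
termination_by l => l.length
decreasing_by
  · have := List.length_dropWhile_le (pvKeep supported_tags skipped_items) rest
    simp only [List.length_cons]; omega
  · simp

-- The value A's gather phase reads at index i.
def pvGet (sequence : List Int) (i : Nat) : Int := PySem.List.pyGetD sequence (Int.ofNat i) 0

lemma pvLoopEquiv (sequence : List Int) (supported_tags : List String) (skipped_items : List Int) :
    ∀ (rest : List (Int × String)) (i : Nat) (acc : List (List Nat)) (cur : List Nat),
      (∀ j (h : j < rest.length), pvGet sequence (i + j) = (rest[j]).1) →
      (pvIdxLoop supported_tags skipped_items i rest acc cur).map (List.map (pvGet sequence)) =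
        pvRunLoop supported_tags skipped_items rest (acc.map (List.map (pvGet sequence))) (cur.map (pvGet sequence)) := by
  intro rest
  induction rest with
  | nil =>
      intro i acc cur _
      simp only [pvIdxLoop, pvRunLoop]
      by_cases h : cur = [] <;> simp [h]
  | cons p rest ih =>
      intro i acc cur hidx
      obtain ⟨token, tag⟩ := p
      have h0 : pvGet sequence i = token := by
        have := hidx 0 (by simp)
        simpa using this
      have hrest : ∀ j (h : j < rest.length), pvGet sequence (i + 1 + j) = (rest[j]).1 := by
        intro j hj
        have := hidx (j + 1) (by simp; omega)
        simpa [Nat.add_assoc, Nat.add_comm 1 j] using this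
      simp only [pvIdxLoop, pvRunLoop]
      by_cases hc : supported_tags.contains tag ∧ ¬ skipped_items.contains token
      · simp only [if_pos hc]
        rw [ih (i + 1) acc (cur ++ [i]) hrest]
        simp [h0]
      · simp only [if_neg hc]
        by_cases hn : cur = []
        · simp only [hn]
          simp only [ne_eq, not_true_eq_false, if_false]
          exact ih (i + 1) acc [] hrest
        · have hn' : cur.map (pvGet sequence) ≠ [] := by simpa using hn
          simp only [ne_eq, hn, not_false_eq_true, hn', if_pos]
          rw [ih (i + 1) (acc ++ [cur]) [] hrest]
          simp

lemma pvZipFst (sequence : List Int) (tags : List String) :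
    ∀ j (h : j < (sequence.zip tags).length), pvGet sequence (0 + j) = ((sequence.zip tags)[j]).1 := by
  intro j h
  have hj : j < sequence.length := by simp [List.length_zip] at h; omega
  have hz : ((sequence.zip tags)[j]).1 = sequence[j] := by
    simp [List.getElem_zip]
  rw [hz]
  simp only [Nat.zero_add, pvGet, Int.ofNat_eq_natCast, PySem.List.pyGetD_natCast]
  exact List.getD_eq_getElem _ _ hj

-- fused loop = chunk characterization
lemma pvRunLoop_eq_chunks (supported_tags : List String) (skipped_items : List Int) :
    ∀ (rest : List (Int × String)) (acc : List (List Int)) (run : List Int),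
      pvRunLoop supported_tags skipped_items rest acc run =
        acc ++ (if run = [] then pvChunks supported_tags skipped_items rest
                else (run ++ (rest.takeWhile (pvKeep supported_tags skipped_items)).map Prod.fst) ::
                  pvChunks supported_tags skipped_items (rest.dropWhile (pvKeep supported_tags skipped_items))) := by
  intro rest
  induction rest with
  | nil =>
      intro acc run
      by_cases h : run = [] <;> simp [pvRunLoop, pvChunks, h]
  | cons p rest ih =>
      intro acc run
      obtain ⟨token, tag⟩ := p
      by_cases hc : supported_tags.contains tag ∧ ¬ skipped_items.contains token
      · have hk : pvKeep supported_tags skipped_items (token, tag) = true := by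
          simp only [pvKeep, Bool.and_eq_true, Bool.not_eq_true']
          exact ⟨hc.1, by simpa using hc.2⟩
        simp only [pvRunLoop, if_pos hc]
        rw [ih]
        have hne : run ++ [token] ≠ [] := by simp
        by_cases h : run = []
        · simp [h, pvChunks, hk]
        · simp [h, hne, hk]
      · have hk : pvKeep supported_tags skipped_items (token, tag) = false := by
          cases h : pvKeep supported_tags skipped_items (token, tag) with
          | false => rfl
          | true =>
              exfalso; apply hc
              simp only [pvKeep, Bool.and_eq_true, Bool.not_eq_true'] at h
              exact ⟨h.1, by simpa using h.2⟩
        by_cases h : run = []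
        · simp only [pvRunLoop, if_neg hc, h, ne_eq, not_true_eq_false, if_false]
          rw [ih]
          simp [pvChunks, hk]
        · simp only [pvRunLoop, if_neg hc, ne_eq, h, not_false_eq_true, if_pos]
          rw [ih]
          simp [pvChunks, hk]
  
-- take of the takeWhile-length is takeWhile
lemma pvTakeLenTakeWhile {α : Type} (q : α → Bool) : ∀ (l : List α), l.take (l.takeWhile q).length = l.takeWhile q := by
  intro l
  induction l with
  | nil => simp
  | cons a l ih =>
      by_cases h : q a = true
      · simp [h, ih]
      · simp [h]

-- drop of the takeWhile-length is dropWhile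
lemma pvDropLenTakeWhile {α : Type} (q : α → Bool) : ∀ (l : List α), l.drop (l.takeWhile q).length = l.dropWhile q := by
  intro l
  induction l with
  | nil => simp
  | cons a l ih =>
      by_cases h : q a = true
      · simp [h, ih]
      · simp [h]

-- the inner while scans exactly the takeWhile prefix
lemma pvInner_char (supported_tags : List String) (skipped_items : List Int)
    (pairs : List (Int × String)) (j : Nat) :
    pvInner supported_tags skipped_items pairs pairs.length j =
      j + ((pairs.drop j).takeWhile (pvKeep supported_tags skipped_items)).length := by
  by_cases hj : j < pairs.length
  · have hdrop : pairs.drop j = pairs[j] :: pairs.drop (j + 1) := List.drop_eq_getElem_cons hj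
    have hget : pairs.getD j (0, "") = pairs[j] := List.getD_eq_getElem _ _ hj
    by_cases hk : pvKeep supported_tags skipped_items pairs[j] = true
    · have hcond : (supported_tags.contains (pairs.getD j (0, "")).2
          && !(skipped_items.contains (pairs.getD j (0, "")).1)) = true := by
        rw [hget]; exact hk
      rw [pvInner, if_pos ⟨hj, hcond⟩]
      rw [pvInner_char supported_tags skipped_items pairs (j + 1)]
      rw [hdrop, List.takeWhile_cons, if_pos hk]
      simp; omega
    · have hcond : ¬ (j < pairs.length ∧ (supported_tags.contains (pairs.getD j (0, "")).2
          && !(skipped_items.contains (pairs.getD j (0, "")).1)) = true) := by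
        rw [hget]; intro h; exact hk h.2
      rw [pvInner, if_neg hcond]
      rw [hdrop, List.takeWhile_cons, if_neg hk]
      simp
  · have hcond : ¬ (j < pairs.length ∧ (supported_tags.contains (pairs.getD j (0, "")).2
        && !(skipped_items.contains (pairs.getD j (0, "")).1)) = true) := by
      intro h; exact hj h.1
    rw [pvInner, if_neg hcond]
    rw [List.drop_eq_nil_of_le (by omega)]
    simp
termination_by pairs.length - j
decreasing_by omega

-- the outer loop from index i produces the chunks of the dropped suffix
lemma pvOuterLoop_char (supported_tags : List String) (skipped_items : List Int)
    (pairs : List (Int × String)) (i : Nat) (result : List (List Int)) :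
    pvOuterLoop supported_tags skipped_items pairs pairs.length i result =
      result ++ pvChunks supported_tags skipped_items (pairs.drop i) := by
  by_cases hi : i < pairs.length
  · have hdrop : pairs.drop i = pairs[i] :: pairs.drop (i + 1) := List.drop_eq_getElem_cons hi
    have hget : pairs.getD i (0, "") = pairs[i] := List.getD_eq_getElem _ _ hi
    by_cases hk : pvKeep supported_tags skipped_items pairs[i] = true
    · have hcond : (supported_tags.contains (pairs.getD i (0, "")).2
          && !(skipped_items.contains (pairs.getD i (0, "")).1)) = true := by
        rw [hget]; exact hk
      rw [pvOuterLoop, dif_pos hi]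
      simp only [if_pos hcond]
      set j := pvInner supported_tags skipped_items pairs pairs.length (i + 1) with hjdef
      have hj : j = i + 1 + ((pairs.drop (i + 1)).takeWhile (pvKeep supported_tags skipped_items)).length :=
        pvInner_char supported_tags skipped_items pairs (i + 1)
      have hji : i < j := by omega
      rw [pvOuterLoop_char supported_tags skipped_items pairs j]
      -- the slice pairs[i:j] equals the takeWhile prefix of drop i
      have hslice : (pairs.drop i).take (j - i) =
          (pairs.drop i).takeWhile (pvKeep supported_tags skipped_items) := by
        rw [hdrop, List.takeWhile_cons, if_pos hk]
        have hlen : j - i = ((pairs.drop (i + 1)).takeWhile (pvKeep supported_tags skipped_items)).length + 1 := by omega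
        rw [hlen, List.take_succ_cons, pvTakeLenTakeWhile]
      have hdropj : pairs.drop j = (pairs.drop (i + 1)).dropWhile (pvKeep supported_tags skipped_items) := by
        have h' : pairs.drop j = (pairs.drop (i + 1)).drop ((pairs.drop (i + 1)).takeWhile (pvKeep supported_tags skipped_items)).length := by
          rw [List.drop_drop, hj]
        rw [h']
        exact pvDropLenTakeWhile _ _
      rw [hslice, hdropj]
      conv_rhs => rw [hdrop]
      rw [pvChunks]
      simp only [if_pos hk]
      rw [← hdrop]
      simp
    · have hcond : (supported_tags.contains (pairs.getD i (0, "")).2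
          && !(skipped_items.contains (pairs.getD i (0, "")).1)) = false := by
        rw [hget]; simpa [pvKeep] using hk
      rw [pvOuterLoop, dif_pos hi]
      simp only [hcond, Bool.false_eq_true, if_false]
      rw [pvOuterLoop_char supported_tags skipped_items pairs (i + 1)]
      conv_rhs => rw [hdrop, pvChunks]
      simp [hk]
  · rw [pvOuterLoop, dif_neg hi]
    rw [List.drop_eq_nil_of_le (by omega)]
    simp [pvChunks]
termination_by pairs.length - i
decreasing_by
  · have := pvInner_ge supported_tags skipped_items pairs pairs.length (i + 1); omega
  · omega

-- ===== VERDICT (by name: the statement is the Claim_ definition above) =====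
theorem extract_supported_subsequences_spec : Claim_equal_extract_supported_subsequences := by
  intro sequence tags supported_tags skipped_items _
  unfold Spec_extract_supported_subsequences extract_supported_subsequences extract_supported_subsequences_alt
  have h1 := pvLoopEquiv sequence supported_tags skipped_items (sequence.zip tags) 0 [] []
    (pvZipFst sequence tags)
  simp only [List.map_nil] at h1
  have h2 := pvRunLoop_eq_chunks supported_tags skipped_items (sequence.zip tags) [] []
  simp only [List.nil_append] at h2
  have h3 := pvOuterLoop_char supported_tags skipped_items (sequence.zip tags) 0 []
  simp only [List.drop_zero, List.nil_append] at h3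
  have hfun : (fun index : List Nat => index.map (fun i => PySem.List.pyGetD sequence (Int.ofNat i) 0)) = List.map (pvGet sequence) := rfl
  rw [hfun, h1, h2, h3]
  simp
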